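-- pv_equiv track=rewrite | github.com/hamnaz22/OneTwoTree | parse_MSA_file.py | infer_pairwise_substitution_matrix
-- ===== SOURCE A (Python) =====
-- def infer_pairwise_substitution_matrix(seq1, seq2):
-- 	substitution_count_dictionary = {"AC": 0, "AG": 0, "AT": 0, "CG": 0, "CT": 0, "GT": 0, "AA": 0, "GG": 0, "CC": 0,
-- 	                                 "TT": 0, "1s": 0, "2s": 0} #1s for one space vs nucleotide, 2s for 2 spaces
-- 	pa_length = 0
-- 	for i in range(0, len(seq1)):
-- 		ch1 = min(seq1[i].upper(), seq2[i].upper())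
-- 		ch2 = max(seq1[i].upper(), seq2[i].upper())
-- 		if ch1 not in ["A", "G", "C", "T"] and ch2 not in ["A", "G", "C", "T"]:
-- 			substitution_count_dictionary["2s"] +=1
-- 		elif ch1 in ["A", "G", "C", "T"] and ch2 in ["A", "G", "C", "T"]: #both nucleotides
-- 			substitution_count_dictionary[ch1+ch2] += 1
-- 			pa_length +=1
-- 		else: #1 space
-- 			substitution_count_dictionary["1s"] += 1
--
-- 	return substitution_count_dictionary, pa_length
-- ===== SOURCE B (Python) =====
-- def infer_pairwise_substitution_matrix(seq1, seq2):
-- 	NUC = ("A", "G", "C", "T")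
-- 	pairs = [(min(a, b), max(a, b)) for a, b in zip(seq1.upper(), seq2.upper())]
-- 	keys = ("AC", "AG", "AT", "CG", "CT", "GT", "AA", "GG", "CC", "TT")
-- 	d = {k: pairs.count((k[0], k[1])) for k in keys}
-- 	d["1s"] = sum(1 for p in pairs if (p[0] in NUC) != (p[1] in NUC))
-- 	d["2s"] = sum(1 for p in pairs if p[0] not in NUC and p[1] not in NUC)
-- 	pa_length = sum(1 for p in pairs if p[0] in NUC and p[1] in NUC)
-- 	return d, pa_length
-- ===== Notes on version B (the rewrite author's own statement) =====
-- stated objective: alternative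
-- what changed: A mutates a 12-key dict slot by slot inside one indexed loop; B builds the normalized (min,max) uppercase pair list once with zip and computes each of the 12 dict values as an independent count/countP over it (dict built by comprehension, no per-position mutation).
import Mathlib
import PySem

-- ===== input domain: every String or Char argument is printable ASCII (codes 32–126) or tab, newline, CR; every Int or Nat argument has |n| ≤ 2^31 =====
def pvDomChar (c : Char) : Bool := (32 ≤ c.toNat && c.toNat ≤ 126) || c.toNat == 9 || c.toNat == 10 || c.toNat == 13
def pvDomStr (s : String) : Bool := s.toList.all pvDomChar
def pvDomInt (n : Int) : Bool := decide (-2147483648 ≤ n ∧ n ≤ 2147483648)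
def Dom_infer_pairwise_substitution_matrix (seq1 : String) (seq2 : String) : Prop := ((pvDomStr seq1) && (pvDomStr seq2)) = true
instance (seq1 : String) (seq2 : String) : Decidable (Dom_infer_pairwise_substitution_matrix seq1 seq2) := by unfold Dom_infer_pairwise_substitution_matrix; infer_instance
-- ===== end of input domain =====

-- B replaces A's per-position dict-mutating loop by one zipped pair list and twelve independent
-- counts over it (one count/countP per key); objective: alternative decomposition, equal return value.

-- ===== PORT A =====
def infer_pairwise_substitution_matrix (seq1 : String) (seq2 : String) : (List (String × Int)) × Int :=
  let d0 : PySem.Dict String Int := PySem.Dict.ofList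
    [("AC",0),("AG",0),("AT",0),("CG",0),("CT",0),("GT",0),("AA",0),("GG",0),("CC",0),("TT",0),("1s",0),("2s",0)]
  let res := (PySem.List.pyRange 0 (PySem.Str.len seq1) 1).foldl
    (fun (st : PySem.Dict String Int × Int) i =>
      let ch1 := min (PySem.Chars.upperChar ((PySem.List.pyGet? seq1.toList i).getD ' '))
                     (PySem.Chars.upperChar ((PySem.List.pyGet? seq2.toList i).getD ' '))
      let ch2 := max (PySem.Chars.upperChar ((PySem.List.pyGet? seq1.toList i).getD ' '))
                     (PySem.Chars.upperChar ((PySem.List.pyGet? seq2.toList i).getD ' '))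
      if !(['A','G','C','T'].contains ch1) && !(['A','G','C','T'].contains ch2) then
        (st.1.modify "2s" 0 (· + 1), st.2)
      else if (['A','G','C','T'].contains ch1) && (['A','G','C','T'].contains ch2) then
        (st.1.modify (String.ofList [ch1, ch2]) 0 (· + 1), st.2 + 1)
      else
        (st.1.modify "1s" 0 (· + 1), st.2))
    (d0, 0)
  (res.1.items, res.2)

-- ===== PORT B =====
def infer_pairwise_substitution_matrix_alt (seq1 : String) (seq2 : String) : (List (String × Int)) × Int :=
  let nuc : List Char := ['A', 'G', 'C', 'T']
  let pairs : List (Char × Char) :=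
    ((PySem.Str.upper seq1).toList.zip (PySem.Str.upper seq2).toList).map
      (fun ab => (min ab.1 ab.2, max ab.1 ab.2))
  let keys : List String := ["AC","AG","AT","CG","CT","GT","AA","GG","CC","TT"]
  let d := keys.foldl
    (fun (d : PySem.Dict String Int) k =>
      d.insert k ((PySem.List.count pairs
        ((PySem.Str.pyGet? k 0).getD ' ', (PySem.Str.pyGet? k 1).getD ' ') : Int)))
    PySem.Dict.empty
  let d := d.insert "1s" ((pairs.countP (fun p => nuc.contains p.1 != nuc.contains p.2) : Int))
  let d := d.insert "2s" ((pairs.countP (fun p => !nuc.contains p.1 && !nuc.contains p.2) : Int))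
  let pa_length : Int := (pairs.countP (fun p => nuc.contains p.1 && nuc.contains p.2) : Int)
  (d.items, pa_length)

-- ===== PRECONDITION & SPEC =====
-- A indexes seq2 at every position of seq1, so it raises IndexError when seq2 is shorter; Pre_ excludes exactly that.
def Pre_infer_pairwise_substitution_matrix (seq1 : String) (seq2 : String) : Prop :=
  seq1.toList.length ≤ seq2.toList.length
instance (seq1 : String) (seq2 : String) : Decidable (Pre_infer_pairwise_substitution_matrix seq1 seq2) := by
  unfold Pre_infer_pairwise_substitution_matrix; infer_instance
def pvWitness_infer_pairwise_substitution_matrix : String × String := ("Ac-Tg", "aCgT.")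

def Spec_infer_pairwise_substitution_matrix (seq1 : String) (seq2 : String) (out : (List (String × Int)) × Int) : Prop := out = infer_pairwise_substitution_matrix_alt seq1 seq2
instance (seq1 : String) (seq2 : String) (out : (List (String × Int)) × Int) : Decidable (Spec_infer_pairwise_substitution_matrix seq1 seq2 out) := by unfold Spec_infer_pairwise_substitution_matrix; infer_instance

-- ===== CLAIM (what is proved, stated in full; the proofs are below) =====
def Claim_equal_infer_pairwise_substitution_matrix : Prop := ∀ (seq1 : String) (seq2 : String), Dom_infer_pairwise_substitution_matrix seq1 seq2 → Pre_infer_pairwise_substitution_matrix seq1 seq2 → Spec_infer_pairwise_substitution_matrix seq1 seq2 (infer_pairwise_substitution_matrix seq1 seq2)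

-- ===== LEMMAS AND PROOFS =====

-- normalisation of one raw character pair, exactly as both loops compute it
def pvG (ab : Char × Char) : Char × Char :=
  (min (PySem.Chars.upperChar ab.1) (PySem.Chars.upperChar ab.2),
   max (PySem.Chars.upperChar ab.1) (PySem.Chars.upperChar ab.2))

def pvN (c : Char) : Bool := ['A', 'G', 'C', 'T'].contains c

def pvCnt (p : List (Char × Char)) (a b : Char) : Int := (p.countP (fun x => pvG x == (a, b)) : Int)
def pvOnes (p : List (Char × Char)) : Int := (p.countP (fun x => pvN (pvG x).1 != pvN (pvG x).2) : Int)
def pvTwos (p : List (Char × Char)) : Int := (p.countP (fun x => !pvN (pvG x).1 && !pvN (pvG x).2) : Int)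
def pvBoth (p : List (Char × Char)) : Int := (p.countP (fun x => pvN (pvG x).1 && pvN (pvG x).2) : Int)

def pvDict (p : List (Char × Char)) : PySem.Dict String Int :=
  PySem.Dict.mk
    [("AC", pvCnt p 'A' 'C'), ("AG", pvCnt p 'A' 'G'), ("AT", pvCnt p 'A' 'T'),
     ("CG", pvCnt p 'C' 'G'), ("CT", pvCnt p 'C' 'T'), ("GT", pvCnt p 'G' 'T'),
     ("AA", pvCnt p 'A' 'A'), ("GG", pvCnt p 'G' 'G'), ("CC", pvCnt p 'C' 'C'),
     ("TT", pvCnt p 'T' 'T'), ("1s", pvOnes p), ("2s", pvTwos p)]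

-- A's loop body as a named function of the raw character pair
def pvStepF (st : PySem.Dict String Int × Int) (ab : Char × Char) : PySem.Dict String Int × Int :=
  let ch1 := min (PySem.Chars.upperChar ab.1) (PySem.Chars.upperChar ab.2)
  let ch2 := max (PySem.Chars.upperChar ab.1) (PySem.Chars.upperChar ab.2)
  if !(['A','G','C','T'].contains ch1) && !(['A','G','C','T'].contains ch2) then
    (st.1.modify "2s" 0 (· + 1), st.2)
  else if (['A','G','C','T'].contains ch1) && (['A','G','C','T'].contains ch2) then
    (st.1.modify (String.ofList [ch1, ch2]) 0 (· + 1), st.2 + 1)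
  else
    (st.1.modify "1s" 0 (· + 1), st.2)

-- fold over range(len l1) reading l1[i], l2[i]  =  fold over zip l1 l2  (when l2 is long enough)
lemma pvFoldRange {σ : Type} (f : σ → Char → Char → σ) (s : σ) (l1 l2 : List Char)
    (h : l1.length ≤ l2.length) :
    (PySem.List.pyRange 0 (l1.length : Int) 1).foldl
      (fun st i => f st ((PySem.List.pyGet? l1 i).getD ' ') ((PySem.List.pyGet? l2 i).getD ' ')) s
    = (l1.zip l2).foldl (fun st ab => f st ab.1 ab.2) s := by
  have aux : ∀ (n : Nat), n ≤ l1.length →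
      (PySem.List.pyRange 0 (n : Int) 1).foldl
        (fun st i => f st ((PySem.List.pyGet? l1 i).getD ' ') ((PySem.List.pyGet? l2 i).getD ' ')) s
      = ((l1.zip l2).take n).foldl (fun st ab => f st ab.1 ab.2) s := by
    intro n
    induction n with
    | zero =>
      intro _
      rw [PySem.List.pyRange_one_eq_nil (by norm_num)]
      simp
    | succ n ih =>
      intro hn
      have hc : ((n + 1 : Nat) : Int) = (n : Int) + 1 := by push_cast; ring
      rw [hc, PySem.List.pyRange_one_succ_right (by positivity), List.foldl_append,
        ih (by omega)]
      have hn1 : n < l1.length := by omega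
      have hn2 : n < l2.length := by omega
      have hz : n < (l1.zip l2).length := by rw [List.length_zip]; omega
      rw [List.take_add_one, List.foldl_append]
      simp [PySem.List.pyGet?_natCast, List.getElem?_eq_getElem hz, List.getElem?_eq_getElem hn1,
        List.getElem?_eq_getElem hn2, List.getElem_zip]
  have h2 := aux l1.length le_rfl
  rwa [List.take_of_length_le (by rw [List.length_zip]; omega)] at h2

lemma pvCnt_append (q : List (Char × Char)) (x : Char × Char) (a b : Char) :
    pvCnt (q ++ [x]) a b = pvCnt q a b + (if pvG x == (a, b) then 1 else 0) := by
  unfold pvCnt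
  rw [List.countP_append]
  by_cases h : pvG x == (a, b) <;> simp [h]

lemma pvOnes_append (q : List (Char × Char)) (x : Char × Char) :
    pvOnes (q ++ [x]) = pvOnes q + (if pvN (pvG x).1 != pvN (pvG x).2 then 1 else 0) := by
  unfold pvOnes
  rw [List.countP_append]
  by_cases h : pvN (pvG x).1 != pvN (pvG x).2 <;> simp [h]

lemma pvTwos_append (q : List (Char × Char)) (x : Char × Char) :
    pvTwos (q ++ [x]) = pvTwos q + (if !pvN (pvG x).1 && !pvN (pvG x).2 then 1 else 0) := by
  unfold pvTwos
  rw [List.countP_append]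
  by_cases h : !pvN (pvG x).1 && !pvN (pvG x).2 <;> simp [h]

lemma pvBoth_append (q : List (Char × Char)) (x : Char × Char) :
    pvBoth (q ++ [x]) = pvBoth q + (if pvN (pvG x).1 && pvN (pvG x).2 then 1 else 0) := by
  unfold pvBoth
  rw [List.countP_append]
  by_cases h : pvN (pvG x).1 && pvN (pvG x).2 <;> simp [h]

lemma pvStep (q : List (Char × Char)) (x : Char × Char) :
    pvStepF (pvDict q, pvBoth q) x = (pvDict (q ++ [x]), pvBoth (q ++ [x])) := by
  have hle : (pvG x).1 ≤ (pvG x).2 := min_le_max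
  unfold pvStepF pvDict
  simp only [pvCnt_append, pvOnes_append, pvTwos_append, pvBoth_append]
  have hch1 : min (PySem.Chars.upperChar x.1) (PySem.Chars.upperChar x.2) = (pvG x).1 := rfl
  have hch2 : max (PySem.Chars.upperChar x.1) (PySem.Chars.upperChar x.2) = (pvG x).2 := rfl
  rw [hch1, hch2]
  rcases hGx : pvG x with ⟨c1, c2⟩
  rw [hGx] at hle
  rcases hb1 : pvN c1 <;> rcases hb2 : pvN c2
  · -- both non-nucleotide: "2s"
    have hx1 : c1 ≠ 'A' ∧ c1 ≠ 'G' ∧ c1 ≠ 'C' ∧ c1 ≠ 'T' := by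
      have h := hb1; simp [pvN] at h; tauto
    have hx2 : c2 ≠ 'A' ∧ c2 ≠ 'G' ∧ c2 ≠ 'C' ∧ c2 ≠ 'T' := by
      have h := hb2; simp [pvN] at h; tauto
    simp only [pvN] at hb1 hb2
    simp [PySem.Dict.modify, PySem.Dict.getD, PySem.Dict.get?, PySem.Dict.insert,
      PySem.Dict.contains, Prod.ext_iff, hx1.1, hx1.2.1, hx1.2.2.1, hx1.2.2.2]
    tauto
  · -- one nucleotide (c2): "1s"
    have hx1 : c1 ≠ 'A' ∧ c1 ≠ 'G' ∧ c1 ≠ 'C' ∧ c1 ≠ 'T' := by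
      have h := hb1; simp [pvN] at h; tauto
    have he2 : c2 = 'A' ∨ c2 = 'G' ∨ c2 = 'C' ∨ c2 = 'T' := by
      have h := hb2; simp [pvN] at h; tauto
    simp only [pvN] at hb1 hb2
    simp [PySem.Dict.modify, PySem.Dict.getD, PySem.Dict.get?, PySem.Dict.insert,
      PySem.Dict.contains, Prod.ext_iff, hx1.1, hx1.2.1, hx1.2.2.1, hx1.2.2.2]
    tauto
  · -- one nucleotide (c1): "1s"
    have hx2 : c2 ≠ 'A' ∧ c2 ≠ 'G' ∧ c2 ≠ 'C' ∧ c2 ≠ 'T' := by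
      have h := hb2; simp [pvN] at h; tauto
    have he1 : c1 = 'A' ∨ c1 = 'G' ∨ c1 = 'C' ∨ c1 = 'T' := by
      have h := hb1; simp [pvN] at h; tauto
    simp only [pvN] at hb1 hb2
    simp [PySem.Dict.modify, PySem.Dict.getD, PySem.Dict.get?, PySem.Dict.insert,
      PySem.Dict.contains, Prod.ext_iff, hx2.1, hx2.2.1, hx2.2.2.1, hx2.2.2.2]
    tauto
  · -- both nucleotides: the sorted two-letter key
    have e1 : c1 = 'A' ∨ c1 = 'G' ∨ c1 = 'C' ∨ c1 = 'T' := by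
      have h := hb1; simp [pvN] at h; tauto
    have e2 : c2 = 'A' ∨ c2 = 'G' ∨ c2 = 'C' ∨ c2 = 'T' := by
      have h := hb2; simp [pvN] at h; tauto
    simp only [pvN] at hb1 hb2
    rcases e1 with rfl | rfl | rfl | rfl <;> rcases e2 with rfl | rfl | rfl | rfl <;>
      first
        | exact absurd hle (by decide)
        | (simp [PySem.Dict.modify, PySem.Dict.getD, PySem.Dict.get?, PySem.Dict.insert,
            PySem.Dict.contains, Prod.ext_iff])

lemma pvLoop (p : List (Char × Char)) : ∀ (q : List (Char × Char)),
    p.foldl pvStepF (pvDict q, pvBoth q) = (pvDict (q ++ p), pvBoth (q ++ p)) := by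
  induction p with
  | nil => intro q; simp
  | cons x p ih =>
    intro q
    rw [List.foldl_cons, pvStep, ih (q ++ [x])]
    simp

lemma pvPortA (s1 s2 : String) (h : s1.toList.length ≤ s2.toList.length) :
    infer_pairwise_substitution_matrix s1 s2
    = ((pvDict (s1.toList.zip s2.toList)).items, pvBoth (s1.toList.zip s2.toList)) := by
  unfold infer_pairwise_substitution_matrix
  dsimp only
  rw [PySem.Str.len_eq]
  exact congrArg (fun (r : PySem.Dict String Int × Int) => (r.1.items, r.2))
    (Eq.trans
      (pvFoldRange (fun st a b => pvStepF st (a, b)) (pvDict [], pvBoth []) s1.toList s2.toList h)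
      (by simpa using pvLoop (s1.toList.zip s2.toList) []))

set_option maxHeartbeats 1000000 in
lemma pvPortB (s1 s2 : String) :
    infer_pairwise_substitution_matrix_alt s1 s2
    = ((pvDict (s1.toList.zip s2.toList)).items, pvBoth (s1.toList.zip s2.toList)) := by
  unfold infer_pairwise_substitution_matrix_alt
  dsimp only
  have hpairs : ((PySem.Str.upper s1).toList.zip (PySem.Str.upper s2).toList).map
      (fun ab => (min ab.1 ab.2, max ab.1 ab.2)) = (s1.toList.zip s2.toList).map pvG := by
    rw [PySem.Str.toList_upper, PySem.Str.toList_upper, PySem.Chars.upper, PySem.Chars.upper,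
      List.zip_map, List.map_map]
    rfl
  rw [hpairs]
  have hcnt : ∀ (a b : Char),
      (PySem.List.count ((s1.toList.zip s2.toList).map pvG) (a, b) : Int)
      = pvCnt (s1.toList.zip s2.toList) a b := by
    intro a b
    unfold pvCnt
    simp [PySem.List.count, List.count, List.countP_map, Function.comp_def]
  simp only [List.foldl_cons, List.foldl_nil]
  rw [show ((PySem.Str.pyGet? "AC" 0).getD ' ', (PySem.Str.pyGet? "AC" 1).getD ' ') = ('A','C') from by decide,
    show ((PySem.Str.pyGet? "AG" 0).getD ' ', (PySem.Str.pyGet? "AG" 1).getD ' ') = ('A','G') from by decide,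
    show ((PySem.Str.pyGet? "AT" 0).getD ' ', (PySem.Str.pyGet? "AT" 1).getD ' ') = ('A','T') from by decide,
    show ((PySem.Str.pyGet? "CG" 0).getD ' ', (PySem.Str.pyGet? "CG" 1).getD ' ') = ('C','G') from by decide,
    show ((PySem.Str.pyGet? "CT" 0).getD ' ', (PySem.Str.pyGet? "CT" 1).getD ' ') = ('C','T') from by decide,
    show ((PySem.Str.pyGet? "GT" 0).getD ' ', (PySem.Str.pyGet? "GT" 1).getD ' ') = ('G','T') from by decide,
    show ((PySem.Str.pyGet? "AA" 0).getD ' ', (PySem.Str.pyGet? "AA" 1).getD ' ') = ('A','A') from by decide,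
    show ((PySem.Str.pyGet? "GG" 0).getD ' ', (PySem.Str.pyGet? "GG" 1).getD ' ') = ('G','G') from by decide,
    show ((PySem.Str.pyGet? "CC" 0).getD ' ', (PySem.Str.pyGet? "CC" 1).getD ' ') = ('C','C') from by decide,
    show ((PySem.Str.pyGet? "TT" 0).getD ' ', (PySem.Str.pyGet? "TT" 1).getD ' ') = ('T','T') from by decide]
  simp only [hcnt]
  simp only [pvDict, pvOnes, pvTwos, pvBoth, List.countP_map, Function.comp_def]
  simp [PySem.Dict.insert, PySem.Dict.contains, PySem.Dict.empty]
  simp [pvN]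

-- ===== VERDICT (by name: the statement is the Claim_ definition above) =====
theorem infer_pairwise_substitution_matrix_spec : Claim_equal_infer_pairwise_substitution_matrix := by
  intro s1 s2 _ hpre
  unfold Spec_infer_pairwise_substitution_matrix
  rw [pvPortA s1 s2 hpre, pvPortB s1 s2]
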